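-- pv_equiv track=rewrite | github.com/mpcodez/AI | manyints.py | sumCommon
-- ===== SOURCE A (Python) =====
-- def find_unique_common_elements(listA, listB):
--     setA = set(listA)
--     setB = set(listB)
--     common_elements = setA.intersection(setB)
--     return list(common_elements)
--
-- def sumCommon(A, B, C):
--     AC = find_unique_common_elements(C, A)
--     BC = find_unique_common_elements(C, B)
--     s = 0
--
--     for i in AC:
--         s += A.count(i)
--
--     for i in BC:
--         s += B.count(i)
--
--     return s
-- ===== SOURCE B (Python) =====
-- def sumCommon(A, B, C):
--     setC = set(C)
--     return sum(1 for x in A if x in setC) + sum(1 for x in B if x in setC)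
-- ===== Notes on version B (the rewrite author's own statement) =====
-- stated objective: simpler
-- what changed: Instead of building the unique intersections set(C)&set(A) and set(C)&set(B) and calling list.count for each unique common value, B makes one linear membership-counting pass over A and over B against set(C).
import Mathlib
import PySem

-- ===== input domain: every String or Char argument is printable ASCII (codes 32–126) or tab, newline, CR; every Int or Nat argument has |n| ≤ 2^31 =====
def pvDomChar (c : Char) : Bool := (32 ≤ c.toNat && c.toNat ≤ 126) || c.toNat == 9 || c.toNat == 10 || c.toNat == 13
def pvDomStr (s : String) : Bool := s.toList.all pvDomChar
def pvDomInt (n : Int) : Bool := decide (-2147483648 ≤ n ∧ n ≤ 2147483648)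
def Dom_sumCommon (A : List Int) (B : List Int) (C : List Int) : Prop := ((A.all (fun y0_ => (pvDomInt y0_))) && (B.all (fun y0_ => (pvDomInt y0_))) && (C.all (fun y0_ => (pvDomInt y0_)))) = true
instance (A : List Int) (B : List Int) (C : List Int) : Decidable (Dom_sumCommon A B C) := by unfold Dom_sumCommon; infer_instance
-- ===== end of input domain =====

-- B replaces the unique-intersection-then-count loops by one linear membership-counting
-- pass over A and B against set(C) (simpler and asymptotically faster).


-- ===== PORT A =====
-- the result is consumed only by an order-independent sum, so iterating the Set list is exact
def find_unique_common_elements (listA : List Int) (listB : List Int) : List Int :=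
  let setA : PySem.Set Int := PySem.Set.ofList listA
  let setB : PySem.Set Int := PySem.Set.ofList listB
  PySem.Set.inter setA setB

def sumCommon (A : List Int) (B : List Int) (C : List Int) : Int :=
  let AC := find_unique_common_elements C A
  let BC := find_unique_common_elements C B
  let s : Int := 0
  let s := AC.foldl (fun s i => s + (PySem.List.count A i : Int)) s
  let s := BC.foldl (fun s i => s + (PySem.List.count B i : Int)) s
  s

-- ===== PORT B =====
def sumCommon_alt (A : List Int) (B : List Int) (C : List Int) : Int :=
  let setC : PySem.Set Int := PySem.Set.ofList C
  (A.foldl (fun acc x => if PySem.Set.contains setC x then acc + 1 else acc) (0 : Int))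
  + (B.foldl (fun acc x => if PySem.Set.contains setC x then acc + 1 else acc) (0 : Int))

-- ===== PRECONDITION & SPEC =====
def Spec_sumCommon (A : List Int) (B : List Int) (C : List Int) (out : Int) : Prop := out = sumCommon_alt A B C
instance (A : List Int) (B : List Int) (C : List Int) (out : Int) : Decidable (Spec_sumCommon A B C out) := by unfold Spec_sumCommon; infer_instance

-- ===== CLAIM (what is proved, stated in full; the proofs are below) =====
def Claim_equal_sumCommon : Prop := ∀ (A : List Int) (B : List Int) (C : List Int), Dom_sumCommon A B C → Spec_sumCommon A B C (sumCommon A B C)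

-- ===== LEMMAS AND PROOFS =====

-- counting occurrences of a fresh value a plus occurrences in S = counting in a::S
theorem countP_cons_mem (A : List Int) (a : Int) (S : List Int) (ha : a ∉ S) :
    A.countP (fun x => decide (x ∈ a :: S)) = A.count a + A.countP (fun x => decide (x ∈ S)) := by
  induction A with
  | nil => simp
  | cons y A ih =>
    rw [List.countP_cons, List.count_cons, ih]
    by_cases hy : y = a
    · subst hy
      have hyS : y ∉ S := ha
      simp [List.mem_cons, hyS]
      omega
    · by_cases hyS : y ∈ S <;> simp [List.mem_cons, hy, hyS] <;> try omega

-- summing A.count over a duplicate-free list S counts the elements of A lying in S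
theorem foldl_count_eq_countP (S : List Int) (hS : S.Nodup) (A : List Int) (s0 : Int) :
    S.foldl (fun s i => s + (List.count i A : Int)) s0
      = s0 + (A.countP (fun x => decide (x ∈ S)) : Int) := by
  induction S generalizing s0 with
  | nil => simp
  | cons a S ih =>
    rcases List.nodup_cons.mp hS with ⟨haS, hS'⟩
    rw [List.foldl_cons, ih hS', countP_cons_mem A a S haS]
    push_cast
    ring

theorem side_eq (A C : List Int) (s0 : Int) :
    (find_unique_common_elements C A).foldl (fun s i => s + (List.count i A : Int)) s0
      = s0 + A.foldl (fun acc x => if PySem.Set.contains (PySem.Set.ofList C) x then acc + 1 else acc) (0 : Int) := by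
  have hnd : (find_unique_common_elements C A).Nodup := by
    unfold find_unique_common_elements
    apply PySem.Set.nodup_inter
    exact PySem.Set.nodup_ofList C
  rw [foldl_count_eq_countP _ hnd, PySem.List.foldl_if_add_one]
  have h1 : A.countP (fun x => decide (x ∈ find_unique_common_elements C A))
       = A.countP (fun x => PySem.Set.contains (PySem.Set.ofList C) x) := by
    refine List.countP_congr (fun x hx => ?_)
    unfold find_unique_common_elements
    simp [PySem.Set.mem_inter, PySem.Set.mem_ofList, hx]
  rw [h1]
  ring

-- ===== VERDICT (by name: the statement is the Claim_ definition above) =====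
theorem sumCommon_spec : Claim_equal_sumCommon := by
  intro A B C _
  show sumCommon A B C = sumCommon_alt A B C
  simp only [sumCommon, sumCommon_alt, PySem.List.count]
  rw [side_eq, side_eq]
  ring
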